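-- pv_equiv track=rewrite | github.com/Forge-NC/Forge | forge/verifier.py | _check_hash_chain
-- ===== SOURCE A (Python) =====
-- def _check_hash_chain(report: dict) -> bool:
--     """Walk results array and verify each entry's prev_hash == prior entry's entry_hash."""
--     results = report.get("results", [])
--     if not isinstance(results, list):
--         return False
--     prev = ""
--     for r in results:
--         if not isinstance(r, dict):
--             return False
--         if (r.get("prev_hash") or "") != prev:
--             return False
--         prev = str(r.get("entry_hash") or "")
--     return True
-- ===== SOURCE B (Python) =====
-- def _check_hash_chain(report: dict) -> bool:
--     """Walk results array and verify each entry's prev_hash == prior entry's entry_hash."""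
--     results = report.get("results", [])
--     if not isinstance(results, list):
--         return False
--     if not all(isinstance(r, dict) for r in results):
--         return False
--     hashes = [str(r.get("entry_hash") or '') for r in results]
--     expected = [''] + hashes[:-1]
--     return all((r.get("prev_hash") or '') == e for r, e in zip(results, expected))
-- ===== Notes on version B (the rewrite author's own statement) =====
-- stated objective: alternative
-- what changed: Replaces the single stateful scan carrying a 'prev' accumulator with a build-then-compare decomposition: first materialise the list of entry hashes, shift it right by one (prepend '' , drop last), then compare it positionally against the prev_hash fields with all()/zip.
import Mathlib
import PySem

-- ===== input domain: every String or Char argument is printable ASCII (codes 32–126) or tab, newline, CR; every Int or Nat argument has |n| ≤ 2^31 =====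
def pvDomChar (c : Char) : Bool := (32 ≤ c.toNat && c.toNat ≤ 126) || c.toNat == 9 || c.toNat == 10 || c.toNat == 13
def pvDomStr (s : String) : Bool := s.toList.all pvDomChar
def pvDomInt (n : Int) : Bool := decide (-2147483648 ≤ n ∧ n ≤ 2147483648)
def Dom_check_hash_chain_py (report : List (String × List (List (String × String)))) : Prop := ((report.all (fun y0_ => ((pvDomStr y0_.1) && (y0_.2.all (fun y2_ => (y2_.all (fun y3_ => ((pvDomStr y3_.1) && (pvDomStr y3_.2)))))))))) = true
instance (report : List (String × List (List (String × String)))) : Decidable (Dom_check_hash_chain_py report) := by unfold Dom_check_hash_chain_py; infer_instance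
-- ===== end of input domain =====

-- B changes the decomposition (build entry-hash list, shift, compare positionally) instead of A's
-- stateful scan; objective: alternative, same cost. Under the typed encoding the isinstance checks
-- of both Pythons are always true and the `.get(k) or ''` / `str(.get(k) or '')` patterns (string
-- values only) are exactly first-match lookup with default "".

-- ===== PORT A =====
-- A's loop: carries `prev`, early-returns false on a mismatch.
def pvCheckLoopA (prev : String) : List (List (String × String)) → Bool
  | [] => true
  | r :: rs =>
      if ((PySem.Dict.mk r).getD "prev_hash" "") ≠ prev then false
      else pvCheckLoopA ((PySem.Dict.mk r).getD "entry_hash" "") rs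

def check_hash_chain_py (report : List (String × List (List (String × String)))) : Bool :=
  let results := (PySem.Dict.mk report).getD "results" []
  pvCheckLoopA "" results

-- ===== PORT B =====
def check_hash_chain_py_alt (report : List (String × List (List (String × String)))) : Bool :=
  let results := (PySem.Dict.mk report).getD "results" []
  let hashes := results.map (fun r => (PySem.Dict.mk r).getD "entry_hash" "")
  let expected := "" :: hashes.dropLast
  (results.zip expected).all (fun p => ((PySem.Dict.mk p.1).getD "prev_hash" "") == p.2)

-- ===== PRECONDITION & SPEC =====
def Spec_check_hash_chain_py (report : List (String × List (List (String × String)))) (out : Bool) : Prop := out = check_hash_chain_py_alt report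
instance (report : List (String × List (List (String × String)))) (out : Bool) : Decidable (Spec_check_hash_chain_py report out) := by unfold Spec_check_hash_chain_py; infer_instance

-- ===== CLAIM (what is proved, stated in full; the proofs are below) =====
def Claim_equal_check_hash_chain_py : Prop := ∀ (report : List (String × List (List (String × String)))), Dom_check_hash_chain_py report → Spec_check_hash_chain_py report (check_hash_chain_py report)

-- ===== LEMMAS AND PROOFS =====
theorem pv_zip_dropLast_shift {A B : Type} (rs : List A) (f : A → B) (a : B) :
    rs.zip ((a :: rs.map f).dropLast) = rs.zip (a :: (rs.map f).dropLast) := by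
  cases rs <;> simp

theorem pvCheckLoopA_eq (rs : List (List (String × String))) : ∀ (prev : String),
    pvCheckLoopA prev rs =
      (rs.zip (prev :: (rs.map (fun r => (PySem.Dict.mk r).getD "entry_hash" "")).dropLast)).all
        (fun p => ((PySem.Dict.mk p.1).getD "prev_hash" "") == p.2) := by
  induction rs with
  | nil => intro prev; rfl
  | cons r rs ih =>
      intro prev
      rw [List.map_cons, List.zip_cons_cons, List.all_cons, pv_zip_dropLast_shift, ← ih]
      show (if ((PySem.Dict.mk r).getD "prev_hash" "") ≠ prev then false
            else pvCheckLoopA ((PySem.Dict.mk r).getD "entry_hash" "") rs) = _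
      by_cases h : ((PySem.Dict.mk r).getD "prev_hash" "") = prev <;> simp [h]

-- ===== VERDICT (by name: the statement is the Claim_ definition above) =====
theorem check_hash_chain_py_spec : Claim_equal_check_hash_chain_py := by
  intro report _
  unfold Spec_check_hash_chain_py check_hash_chain_py check_hash_chain_py_alt
  simp only [pvCheckLoopA_eq]
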